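-- pv_equiv track=rewrite | github.com/pedramsalimi/Useful-Algorithmic-Problems-with-Python | Recursive_Word_Splitting.py | recursive_word_splitter
-- ===== SOURCE A (Python) =====
-- def recursive_word_splitter(s,l,output=None):
--
--     if output is None:
--         output = []
--
--     for word in l:
--         if s.startswith(word):
--             output.append(word)
--             return recursive_word_splitter(s[len(word):],l,output)
--     return output
-- ===== SOURCE B (Python) =====
-- def recursive_word_splitter(s, l, output=None):
--     # Iterative version: bucket the words by first character once, then walk the
--     # string, consulting only the bucket of the current first character.
--     if output is None:
--         output = []
--     buckets = {}
--     for w in l: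
--         if w:
--             buckets.setdefault(w[0], []).append(w)
--     rest = s
--     while rest:
--         match = None
--         for w in buckets.get(rest[0], ()):
--             if rest.startswith(w):
--                 match = w
--                 break
--         if match is None:
--             break
--         output.append(match)
--         rest = rest[len(match):]
--     return output
-- ===== Notes on version B (the rewrite author's own statement) =====
-- stated objective: faster
-- what changed: Replaces the recursive first-match scan over the whole word list at every position with an iterative loop that pre-buckets the words by first character once and only tests the bucket of the current character.
import Mathlib
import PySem

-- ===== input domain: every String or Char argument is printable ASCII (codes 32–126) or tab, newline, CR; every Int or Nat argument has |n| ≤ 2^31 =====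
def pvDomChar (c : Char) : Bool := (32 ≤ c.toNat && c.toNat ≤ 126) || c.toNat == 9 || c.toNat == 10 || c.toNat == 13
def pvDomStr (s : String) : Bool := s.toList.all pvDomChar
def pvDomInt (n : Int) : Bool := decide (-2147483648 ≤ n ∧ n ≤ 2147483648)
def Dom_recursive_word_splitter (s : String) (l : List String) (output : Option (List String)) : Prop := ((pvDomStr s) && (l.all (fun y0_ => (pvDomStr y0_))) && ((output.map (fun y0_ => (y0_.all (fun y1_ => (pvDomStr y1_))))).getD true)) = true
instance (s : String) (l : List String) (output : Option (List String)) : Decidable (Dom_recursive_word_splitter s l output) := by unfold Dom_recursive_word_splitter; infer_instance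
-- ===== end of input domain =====

-- B replaces A's recursion that re-scans the whole word list at every position by an
-- iterative loop over a one-time bucketing of the words by first character (objective: faster).
-- A mutates `output` in place when given; the equivalence proved here is about the RETURN value
-- (B performs the same appends in Python).

-- ===== PORT A =====
-- recursion of A, on the character list; fuel bounds the recursion depth (s shrinks by ≥ 1
-- per step whenever the empty word is not in l, which Pre_ guarantees)
def rwsGoA : Nat → List Char → List (List Char) → List String → List String
  | 0, _, _, out => out
  | f + 1, s, l, out =>
    match l.find? (fun w => PySem.Chars.startswith s w) with
    | none => out
    | some w => rwsGoA f (s.drop w.length) l (out ++ [String.ofList w])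

def recursive_word_splitter (s : String) (l : List String) (output : Option (List String)) : List String :=
  rwsGoA (s.toList.length + 1) s.toList (l.map String.toList) (output.getD [])

-- ===== PORT B =====
-- buckets.setdefault(w[0], []).append(w) for the nonempty words
def rwsBuckets (l : List (List Char)) : PySem.Dict Char (List (List Char)) :=
  l.foldl (fun d w =>
    match w with
    | [] => d
    | c :: _ => d.insert c (d.getD c [] ++ [w])) PySem.Dict.empty

-- the while loop of B
def rwsGoB : Nat → List Char → PySem.Dict Char (List (List Char)) → List String → List String
  | 0, _, _, out => out
  | f + 1, s, d, out =>
    match s with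
    | [] => out
    | c :: _ =>
      match (d.getD c []).find? (fun w => PySem.Chars.startswith s w) with
      | none => out
      | some w => rwsGoB f (s.drop w.length) d (out ++ [String.ofList w])

def recursive_word_splitter_alt (s : String) (l : List String) (output : Option (List String)) : List String :=
  rwsGoB (s.toList.length + 1) s.toList (rwsBuckets (l.map String.toList)) (output.getD [])

-- ===== PRECONDITION & SPEC =====
-- Pre_ excludes word lists containing the empty string: there A recurses forever on the
-- empty word (RecursionError), never returning a value.
def Pre_recursive_word_splitter (s : String) (l : List String) (output : Option (List String)) : Prop :=
  "" ∉ l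
instance (s : String) (l : List String) (output : Option (List String)) : Decidable (Pre_recursive_word_splitter s l output) := by unfold Pre_recursive_word_splitter; infer_instance

def pvWitness_recursive_word_splitter : String × List String × Option (List String) :=
  ("abcab", ["ab", "c"], some ["x"])

def Spec_recursive_word_splitter (s : String) (l : List String) (output : Option (List String)) (out : List String) : Prop := out = recursive_word_splitter_alt s l output
instance (s : String) (l : List String) (output : Option (List String)) (out : List String) : Decidable (Spec_recursive_word_splitter s l output out) := by unfold Spec_recursive_word_splitter; infer_instance

-- ===== CLAIM (what is proved, stated in full; the proofs are below) =====
def Claim_equal_recursive_word_splitter : Prop := ∀ (s : String) (l : List String) (output : Option (List String)), Dom_recursive_word_splitter s l output → Pre_recursive_word_splitter s l output → Spec_recursive_word_splitter s l output (recursive_word_splitter s l output)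

-- ===== LEMMAS AND PROOFS =====

-- find? respects pointwise equality of predicates on members (not in Mathlib under this form)
theorem rws_find?_congr_mem {α : Type} (l : List α) (p q : α → Bool)
    (h : ∀ x ∈ l, p x = q x) : l.find? p = l.find? q := by
  induction l with
  | nil => rfl
  | cons a t ih =>
    simp only [List.find?_cons]
    rw [h a (by simp)]
    cases q a
    · exact ih (fun x hx => h x (by simp [hx]))
    · rfl

def rwsHeadIs (c : Char) (w : List Char) : Bool :=
  match w with
  | [] => false
  | c' :: _ => c' == c

theorem rws_buckets_getD (l : List (List Char)) (c : Char) :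
    (rwsBuckets l).getD c [] = l.filter (rwsHeadIs c) := by
  suffices h : ∀ (d : PySem.Dict Char (List (List Char))),
      (l.foldl (fun d w =>
        match w with
        | [] => d
        | c' :: _ => d.insert c' (d.getD c' [] ++ [w])) d).getD c []
        = d.getD c [] ++ l.filter (rwsHeadIs c) by
    have := h PySem.Dict.empty
    simpa [rwsBuckets, PySem.Dict.getD, PySem.Dict.empty, PySem.Dict.get?] using this
  induction l with
  | nil => intro d; simp
  | cons w t ih =>
    intro d
    cases w with
    | nil => simpa [rwsHeadIs] using ih d
    | cons c' w' =>
      simp only [List.foldl_cons, List.filter_cons]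
      by_cases hc : c' = c
      · subst hc
        rw [ih]
        simp [rwsHeadIs, PySem.Dict.getD, PySem.Dict.get?_insert_self]
      · rw [ih]
        simp only [PySem.Dict.getD]
        rw [PySem.Dict.get?_insert_of_ne d ((d.get? c').getD [] ++ [c' :: w']) (fun h => hc h.symm)]
        simp [rwsHeadIs, hc]

theorem rws_startswith_nil (w : List Char) (hw : w ≠ []) :
    PySem.Chars.startswith ([] : List Char) w = false := by
  by_contra h
  have := (PySem.Chars.startswith_iff ([] : List Char) w).mp (by
    cases hx : PySem.Chars.startswith ([] : List Char) w
    · exact absurd hx h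
    · rfl)
  exact hw (List.prefix_nil.mp this)

theorem rws_startswith_head (c : Char) (rest w : List Char) (hw : w ≠ [])
    (h : PySem.Chars.startswith (c :: rest) w = true) : rwsHeadIs c w = true := by
  have hp := (PySem.Chars.startswith_iff (c :: rest) w).mp h
  cases w with
  | nil => exact absurd rfl hw
  | cons c' w' =>
    obtain ⟨t, ht⟩ := hp
    simp only [List.cons_append] at ht
    simp [rwsHeadIs, (List.cons.injEq _ _ _ _).mp ht |>.1]

-- the two loops agree step by step
theorem rws_go_eq (L : List (List Char)) (hL : [] ∉ L) :
    ∀ (f : Nat) (s : List Char) (out : List String),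
      rwsGoA f s L out = rwsGoB f s (rwsBuckets L) out := by
  intro f
  induction f with
  | zero => intro s out; rfl
  | succ f ih =>
    intro s out
    cases s with
    | nil =>
      have hfind : L.find? (fun w => PySem.Chars.startswith [] w) = none := by
        rw [List.find?_eq_none]
        intro w hw
        simp [rws_startswith_nil w (fun h => hL (h ▸ hw))]
      simp [rwsGoA, rwsGoB, hfind]
    | cons c rest =>
      have hkey : L.find? (fun w => PySem.Chars.startswith (c :: rest) w)
          = ((rwsBuckets L).getD c []).find? (fun w => PySem.Chars.startswith (c :: rest) w) := by
        rw [rws_buckets_getD, List.find?_filter]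
        apply rws_find?_congr_mem
        intro w hw
        have hw' : w ≠ [] := fun h => hL (h ▸ hw)
        cases hx : PySem.Chars.startswith (c :: rest) w
        · simp
        · simp [rws_startswith_head c rest w hw' hx]
      simp only [rwsGoA, rwsGoB, hkey]
      cases ((rwsBuckets L).getD c []).find? (fun w => PySem.Chars.startswith (c :: rest) w) with
      | none => rfl
      | some w => exact ih _ _

theorem rws_nil_not_mem_map (l : List String) (h : "" ∉ l) : [] ∉ l.map String.toList := by
  intro hm
  obtain ⟨w, hw, hwe⟩ := List.mem_map.mp hm
  have : w = "" := by
    have h2 := congrArg String.ofList hwe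
    simpa using h2
  exact h (this ▸ hw)

-- ===== VERDICT (by name: the statement is the Claim_ definition above) =====
theorem recursive_word_splitter_spec : Claim_equal_recursive_word_splitter := by
  intro s l output _ hpre
  unfold Spec_recursive_word_splitter recursive_word_splitter recursive_word_splitter_alt
  exact rws_go_eq (l.map String.toList) (rws_nil_not_mem_map l hpre) _ _ _
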